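/- GENERATED by farm/mkstatement.py from design/units.tsv (unit `heap_live_size`) and the Specs of ProgX/Base/Spec/*.lean — do not edit.
   THE STATEMENT of the proof unit `heap_live_size`: the function `heap_live_size` (26 instructions) satisfies its contract,
   given the contracts of its callees. What the names mean: ProgX/Base/Spec/Basic.lean. The theorem to prove:
   `theorem heap_live_size_ok : ProgX.Base.Spec.heap_live_size.Statement`. -/
import ProgX.Base.Spec.Heap
namespace ProgX.Base.Spec.heap_live_size
open X86 X86.User Asan

/-- The statement of unit `heap_live_size`. -/
def Statement : Prop :=
  ∀ (Lay : Layout) (_hLay : Lay.hi = 0x1000000) (μ : Microarch) (_hμ : UserX.MicroOK μ) (u₀ : State)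
    (_hcode : HasCodeNat Lay u₀ ProgX.Base.L.heap_live_size.entry ProgX.Base.Code.code_heap_live_size.nat ProgX.Base.L.heap_live_size.size),
    ∀ (H : Heap) (n : Nat), Calls Lay μ ProgX.Base.WayInv (ProgX.Base.conv u₀) ProgX.Base.L.heap_live_size.entry (ProgX.Base.Spec.heap_live_size.spec H n)

end ProgX.Base.Spec.heap_live_size
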